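-- pv_equiv track=rewrite | github.com/SAICHANDVUPPALA/Competitive-Programming-Elective-3 | 09-nearestbusstop-Python/nearestbusstop.py | fun_nearestbusstop
-- ===== SOURCE A (Python) =====
-- def fun_nearestbusstop(street):
-- 	if(street==0):
-- 		return 0
-- 	for i in range(0,street,8):
-- 		if(i==0):
-- 			if(street<=8 and street>4):
-- 				return 8
-- 			elif(street<=4):
-- 				return 0
-- 		else:
-- 			if(street>=i and street<=2*i-4):
-- 				return i
-- 			else:
-- 				return 2*i
-- ===== SOURCE B (Python) =====
-- def fun_nearestbusstop(street):
--     # closed-form classification: stops are at 0, 8, 16; midpoint rule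
--     if street <= 4:
--         return 0
--     if street <= 12:
--         return 8
--     return 16
-- ===== Notes on version B (the rewrite author's own statement) =====
-- stated objective: simpler
-- what changed: Replaces the range(0, street, 8) loop with early returns by a direct three-way comparison ladder (street<=4 -> 0, street<=12 -> 8, else 16), the closed form of what the loop's first two iterations decide.
-- outside the precondition, e.g. on fun_nearestbusstop(-3): A returns None, B returns 0
import Mathlib
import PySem

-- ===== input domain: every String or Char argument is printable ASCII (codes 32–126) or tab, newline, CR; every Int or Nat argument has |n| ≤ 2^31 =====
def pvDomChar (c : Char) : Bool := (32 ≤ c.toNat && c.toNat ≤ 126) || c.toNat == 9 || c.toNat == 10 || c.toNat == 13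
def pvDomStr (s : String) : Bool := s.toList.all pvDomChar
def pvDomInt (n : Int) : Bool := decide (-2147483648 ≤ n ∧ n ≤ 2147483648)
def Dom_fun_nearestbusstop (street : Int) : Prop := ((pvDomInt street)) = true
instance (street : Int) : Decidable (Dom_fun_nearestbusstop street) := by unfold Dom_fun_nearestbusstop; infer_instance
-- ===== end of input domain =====

-- B replaces A's range(0, street, 8) loop by the direct comparison ladder it amounts to (objective: simpler).

-- ===== PORT A =====
-- the body of A's for-loop, with early return as Option; none = loop fell through
def pvLoopA (street : Int) : List Int → Option Int
  | [] => none
  | i :: rest =>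
    if i = 0 then
      if street ≤ 8 ∧ street > 4 then some 8
      else if street ≤ 4 then some 0
      else pvLoopA street rest
    else
      if street ≥ i ∧ street ≤ 2 * i - 4 then some i else some (2 * i)

def fun_nearestbusstop (street : Int) : Int :=
  if street = 0 then 0
  else (pvLoopA street (PySem.List.pyRange 0 street 8)).getD 0

-- ===== PORT B =====
def fun_nearestbusstop_alt (street : Int) : Int :=
  if street ≤ 4 then 0
  else if street ≤ 12 then 8
  else 16

-- ===== PRECONDITION & SPEC =====
-- Pre_ excludes street < 0, on which A's for-loop body never runs and A falls off the
-- end returning None (not an int); B returns 0 there.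
def Pre_fun_nearestbusstop (street : Int) : Prop := 0 ≤ street
instance (street : Int) : Decidable (Pre_fun_nearestbusstop street) := by unfold Pre_fun_nearestbusstop; infer_instance
def pvWitness_fun_nearestbusstop : Int := 7

def Spec_fun_nearestbusstop (street : Int) (out : Int) : Prop := out = fun_nearestbusstop_alt street
instance (street : Int) (out : Int) : Decidable (Spec_fun_nearestbusstop street out) := by unfold Spec_fun_nearestbusstop; infer_instance

-- ===== CLAIM (what is proved, stated in full; the proofs are below) =====
def Claim_equal_fun_nearestbusstop : Prop := ∀ (street : Int), Dom_fun_nearestbusstop street → Pre_fun_nearestbusstop street → Spec_fun_nearestbusstop street (fun_nearestbusstop street)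

-- ===== LEMMAS AND PROOFS =====

-- shape of range(0, street, 8): one element for 1 ≤ street ≤ 8, first two elements 0, 8 for street > 8
lemma pvRange_small (street : Int) (h1 : 1 ≤ street) (h8 : street ≤ 8) :
    PySem.List.pyRange 0 street 8 = [0] := by
  rw [PySem.List.pyRange_of_pos 0 street (by norm_num)]
  have ht : ((street - 0 + 8 - 1) / 8).toNat = 1 := by omega
  rw [if_pos (by omega : (0:Int) < street), ht]
  simp

lemma pvRange_big (street : Int) (h : 9 ≤ street) :
    ∃ rest, PySem.List.pyRange 0 street 8 = 0 :: 8 :: rest := by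
  rw [PySem.List.pyRange_of_pos 0 street (by norm_num)]
  have hn : ∃ m, ((street - 0 + 8 - 1) / 8).toNat = 2 + m := by
    have : 2 ≤ ((street - 0 + 8 - 1) / 8) := by omega
    exact ⟨((street - 0 + 8 - 1) / 8).toNat - 2, by omega⟩
  obtain ⟨m, hm⟩ := hn
  rw [if_pos (by omega : (0:Int) < street), hm, List.range_add]
  refine ⟨(List.range m).map (fun k => 0 + 8 * ((2 + k : Nat) : Int)), ?_⟩
  simp only [List.map_map, List.map_append, List.range_succ, List.range_zero,
    List.map_nil, List.nil_append, List.map_cons, Function.comp_def, List.cons_append]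
  norm_num

-- ===== VERDICT (by name: the statement is the Claim_ definition above) =====
theorem fun_nearestbusstop_spec : Claim_equal_fun_nearestbusstop := by
  intro street _ hpre
  have hp : 0 ≤ street := hpre
  unfold Spec_fun_nearestbusstop fun_nearestbusstop fun_nearestbusstop_alt
  by_cases h0 : street = 0
  · simp [h0]
  · rw [if_neg h0]
    by_cases h8 : street ≤ 8
    · rw [pvRange_small street (by omega) h8]
      simp only [pvLoopA]
      split_ifs <;> first | (simp only [Option.getD_some, Option.getD_none]; try omega) | omega
    · obtain ⟨rest, hr⟩ := pvRange_big street (by omega)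
      rw [hr]
      simp only [pvLoopA]
      split_ifs <;> first | (simp only [Option.getD_some, Option.getD_none]; try omega) | omega
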